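-- pv_equiv track=rewrite | github.com/Bradysm/daily_coding_problems | KcoloredGraph.py | valid_colorings
-- ===== SOURCE A (Python) =====
-- def valid_colorings(curr_node, graph, node_values, k) -> list:
--     colors = set([color for color in range(k)])
--     node_edges = graph[curr_node]
--
--     for node, has_edge in enumerate(node_edges):
--         node_color = node_values[node]
--         if has_edge and node_color in colors:
--             colors.remove(node_color)
--
--     return list(colors)
-- ===== SOURCE B (Python) =====
-- def valid_colorings(curr_node, graph, node_values, k) -> list:
--     # Per-color validity test: a color c is valid iff no edge of curr_node
--     # leads to a node already colored c; test each candidate c directly.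
--     row = graph[curr_node]
--     return [c for c in range(k)
--             if not any(e and node_values[i] == c for i, e in enumerate(row))]
-- ===== Notes on version B (the rewrite author's own statement) =====
-- stated objective: alternative
-- what changed: Replaces A's build-set-of-all-colors-then-remove-neighbor-colors with a direct per-candidate validity test: for each color c in range(k), scan the adjacency row and keep c iff no edged neighbor is colored c (no set or removal at all).
import Mathlib
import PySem

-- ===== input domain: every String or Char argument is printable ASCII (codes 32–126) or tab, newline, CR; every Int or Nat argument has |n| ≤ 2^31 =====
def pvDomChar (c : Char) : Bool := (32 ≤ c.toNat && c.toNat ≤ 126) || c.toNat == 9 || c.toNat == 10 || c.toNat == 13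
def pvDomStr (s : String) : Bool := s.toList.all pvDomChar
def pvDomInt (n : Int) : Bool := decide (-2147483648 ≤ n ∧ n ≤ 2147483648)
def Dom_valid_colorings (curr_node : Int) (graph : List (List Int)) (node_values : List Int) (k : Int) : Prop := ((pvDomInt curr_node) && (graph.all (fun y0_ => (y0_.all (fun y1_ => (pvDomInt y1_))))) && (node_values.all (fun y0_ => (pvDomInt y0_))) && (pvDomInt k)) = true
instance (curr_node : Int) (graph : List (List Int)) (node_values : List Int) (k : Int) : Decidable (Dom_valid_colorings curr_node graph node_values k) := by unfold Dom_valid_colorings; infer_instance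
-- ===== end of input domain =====

-- B tests each candidate color directly against the adjacency row instead of
-- A's build-set-of-all-colors-then-remove (objective: alternative). Return values only.

-- ===== PORT A =====
-- A iterates CPython's set of the ints 0..k-1, whose iteration order here is the
-- ascending insertion order preserved by removals; PySem.Set models exactly that list.
-- Loop body of A, one per enumerated (node, has_edge) pair.
def pvStepA (nv : List Int) (cs : PySem.Set Int) (p : Int × Int) : PySem.Set Int :=
  let node_color := PySem.List.pyGetD nv p.1 0
  if p.2 ≠ 0 ∧ cs.contains node_color then (PySem.Set.remove? cs node_color).getD cs else cs

def valid_colorings (curr_node : Int) (graph : List (List Int)) (node_values : List Int) (k : Int) : List Int :=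
  let colors : PySem.Set Int := PySem.Set.ofList (PySem.List.pyRange 0 k 1)
  let node_edges : List Int := (PySem.List.pyGet? graph curr_node).getD []
  (PySem.List.enumerate node_edges).foldl (pvStepA node_values) colors

-- ===== PORT B =====
-- B's inner test: 'any(e and node_values[i] == c for i, e in enumerate(row))'.
def pvUsedBy (nv : List Int) (row : List Int) (c : Int) : Bool :=
  (PySem.List.enumerate row).any (fun p => (p.2 != 0) && (PySem.List.pyGetD nv p.1 0 == c))

def valid_colorings_alt (curr_node : Int) (graph : List (List Int)) (node_values : List Int) (k : Int) : List Int :=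
  let row : List Int := (PySem.List.pyGet? graph curr_node).getD []
  (PySem.List.pyRange 0 k 1).filter (fun c => !pvUsedBy node_values row c)

-- ===== PRECONDITION & SPEC =====
-- Pre_ excludes exactly the inputs where A raises: curr_node out of range for graph
-- (IndexError) or graph[curr_node] longer than node_values (IndexError inside the loop).
def Pre_valid_colorings (curr_node : Int) (graph : List (List Int)) (node_values : List Int) (k : Int) : Prop :=
  PySem.Raise.InRange graph.length curr_node ∧
  ((PySem.List.pyGet? graph curr_node).getD []).length ≤ node_values.length

instance (curr_node : Int) (graph : List (List Int)) (node_values : List Int) (k : Int) : Decidable (Pre_valid_colorings curr_node graph node_values k) := by unfold Pre_valid_colorings; infer_instance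

def pvWitness_valid_colorings : Int × List (List Int) × List Int × Int := (0, [[0, 1], [1, 0]], [2, 1], 3)

def Spec_valid_colorings (curr_node : Int) (graph : List (List Int)) (node_values : List Int) (k : Int) (out : List Int) : Prop := out = valid_colorings_alt curr_node graph node_values k
instance (curr_node : Int) (graph : List (List Int)) (node_values : List Int) (k : Int) (out : List Int) : Decidable (Spec_valid_colorings curr_node graph node_values k out) := by unfold Spec_valid_colorings; infer_instance

-- ===== CLAIM (what is proved, stated in full; the proofs are below) =====
def Claim_equal_valid_colorings : Prop := ∀ (curr_node : Int) (graph : List (List Int)) (node_values : List Int) (k : Int), Dom_valid_colorings curr_node graph node_values k → Pre_valid_colorings curr_node graph node_values k → Spec_valid_colorings curr_node graph node_values k (valid_colorings curr_node graph node_values k)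

-- ===== LEMMAS AND PROOFS =====

-- One step of A's removal loop acts on any set S as filtering out the current
-- neighbor's color when the edge is present (a vacuous filter otherwise).
lemma stepA_eq_filter (nv : List Int) (S : List Int) (p : Int × Int) :
    pvStepA nv S p
    = S.filter (fun c => !((p.2 != 0) && (PySem.List.pyGetD nv p.1 0 == c))) := by
  set c0 := PySem.List.pyGetD nv p.1 0 with hc0
  by_cases he : p.2 ≠ 0
  · by_cases hin : PySem.Set.contains S c0 = true
    · have : pvStepA nv S p = S.filter (fun y => !(y == c0)) := by
        show (if p.2 ≠ 0 ∧ PySem.Set.contains S c0 then (PySem.Set.remove? S c0).getD S else S) = _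
        rw [if_pos ⟨he, hin⟩, PySem.Set.remove?, if_pos hin, Option.getD_some]
        simp [PySem.Set.discard]
      rw [this]
      have hp : (p.2 != 0) = true := by simpa using he
      apply List.filter_congr
      intro x _
      simp [hp, eq_comm]
    · have hA : pvStepA nv S p = S := by
        show (if p.2 ≠ 0 ∧ PySem.Set.contains S c0 then (PySem.Set.remove? S c0).getD S else S) = _
        rw [if_neg (by tauto)]
      have hnm : c0 ∉ S := by simpa [PySem.Set.contains] using hin
      rw [hA]
      apply Eq.symm
      apply List.filter_eq_self.mpr
      intro x hx
      have : c0 ≠ x := fun h => hnm (h ▸ hx)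
      simp [this]
  · have hA : pvStepA nv S p = S := by
      show (if p.2 ≠ 0 ∧ PySem.Set.contains S c0 then (PySem.Set.remove? S c0).getD S else S) = _
      rw [if_neg (by tauto)]
    have hp : (p.2 != 0) = false := by simpa using he
    simp [hA, hp]

-- Folding A's removal steps over any pair list equals one filter of the start
-- set by "no pair in the list forbids this color" — B's per-color test.
lemma foldA_eq_filter_any (nv : List Int) :
    ∀ (l : List (Int × Int)) (S : List Int),
    l.foldl (pvStepA nv) S
    = S.filter (fun c => !(l.any (fun p => (p.2 != 0) && (PySem.List.pyGetD nv p.1 0 == c))))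
  | [], S => by simp
  | p :: l, S => by
    rw [List.foldl_cons, stepA_eq_filter nv S p, foldA_eq_filter_any nv l, List.filter_filter]
    apply List.filter_congr
    intro x _
    simp [Bool.not_or, Bool.and_comm]

-- set(range(k)) is range(k) itself (already duplicate-free).
lemma ofList_range (k : Int) :
    PySem.Set.ofList (PySem.List.pyRange 0 k 1) = PySem.List.pyRange 0 k 1 :=
  PySem.Set.ofList_eq_self_of_nodup _ (PySem.List.nodup_pyRange_one 0 k)

-- ===== VERDICT (by name: the statement is the Claim_ definition above) =====
theorem valid_colorings_spec : Claim_equal_valid_colorings := by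
  intro curr_node graph node_values k _ _
  unfold Spec_valid_colorings valid_colorings valid_colorings_alt pvUsedBy
  rw [ofList_range k, foldA_eq_filter_any]
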